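-- pv_equiv track=rewrite | github.com/Myangsun/bumblebee_bplusplus | scripts/llm_judge.py | _aggregate_failure_counts
-- ===== SOURCE A (Python) =====
-- _FAILURE_FIELDS = [
--     ("species_fidelity", "extra_missing_limbs", "Extra/Missing\nLimbs"),
--     ("species_fidelity", "wrong_coloration", "Wrong\nColoration"),
--     ("species_fidelity", "impossible_geometry", "Impossible\nGeometry"),
--     ("image_quality", "blurry_artifacts", "Blurry/\nArtifacts"),
--     ("image_quality", "background_bleed", "Background\nBleed"),
--     ("image_quality", "flower_unrealistic", "Unrealistic\nFlowers"),
--     ("image_quality", "repetitive_pattern", "Repetitive\nPattern"),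
-- ]
--
-- def _aggregate_failure_counts(valid: list[dict]) -> dict:
--     """Count failure mode occurrences across results."""
--     counts = {f[2]: 0 for f in _FAILURE_FIELDS}
--     for r in valid:
--         for section, field, label in _FAILURE_FIELDS:
--             if r.get(section, {}).get(field):
--                 counts[label] += 1
--     # Return with field names as keys for JSON
--     return {
--         field: sum(
--             1 for r in valid if r.get(section, {}).get(field)
--         )
--         for section, field, _ in _FAILURE_FIELDS
--     }
-- ===== SOURCE B (Python) =====
-- _FAILURE_FIELDS = [
--     ("species_fidelity", "extra_missing_limbs", "Extra/Missing\nLimbs"),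
--     ("species_fidelity", "wrong_coloration", "Wrong\nColoration"),
--     ("species_fidelity", "impossible_geometry", "Impossible\nGeometry"),
--     ("image_quality", "blurry_artifacts", "Blurry/\nArtifacts"),
--     ("image_quality", "background_bleed", "Background\nBleed"),
--     ("image_quality", "flower_unrealistic", "Unrealistic\nFlowers"),
--     ("image_quality", "repetitive_pattern", "Repetitive\nPattern"),
-- ]
--
-- def _aggregate_failure_counts(valid: list[dict]) -> dict:
--     """Count failure mode occurrences in ONE pass over the records,
--     carrying a vector of counters (no per-field rescans of `valid`)."""
--     counts = [0] * len(_FAILURE_FIELDS)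
--     for r in valid:
--         counts = [
--             c + (1 if r.get(section, {}).get(field) else 0)
--             for c, (section, field, _) in zip(counts, _FAILURE_FIELDS)
--         ]
--     return {field: c for (_, field, _), c in zip(_FAILURE_FIELDS, counts)}
-- ===== Notes on version B (the rewrite author's own statement) =====
-- stated objective: alternative
-- what changed: B makes a single pass over the records carrying a vector of seven counters (zipped against _FAILURE_FIELDS) and builds the result dict once at the end, instead of A's seven separate sum() generator scans over valid (plus A's discarded label-keyed counting loop).
import Mathlib
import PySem

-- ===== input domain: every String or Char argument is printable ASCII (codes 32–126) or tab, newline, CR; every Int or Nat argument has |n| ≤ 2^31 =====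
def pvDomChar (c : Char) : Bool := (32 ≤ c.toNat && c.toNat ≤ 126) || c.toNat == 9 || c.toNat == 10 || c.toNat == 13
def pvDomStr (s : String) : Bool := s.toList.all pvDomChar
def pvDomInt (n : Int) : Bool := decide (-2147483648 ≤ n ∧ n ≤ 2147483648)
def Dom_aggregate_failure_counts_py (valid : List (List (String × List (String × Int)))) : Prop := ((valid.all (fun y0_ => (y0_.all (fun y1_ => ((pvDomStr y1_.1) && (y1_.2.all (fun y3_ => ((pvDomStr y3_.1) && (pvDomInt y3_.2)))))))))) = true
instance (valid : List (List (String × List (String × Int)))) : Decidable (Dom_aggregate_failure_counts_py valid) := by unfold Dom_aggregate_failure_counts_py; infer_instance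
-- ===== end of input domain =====

-- B replaces A's seven separate counting scans over `valid` by one pass carrying a
-- vector of seven counters (objective: alternative single-pass decomposition).

-- ===== PORT A =====
-- _FAILURE_FIELDS: (section, field, label)
def pvFFL : List (String × String × String) := [
  ("species_fidelity", "extra_missing_limbs", "Extra/Missing\nLimbs"),
  ("species_fidelity", "wrong_coloration", "Wrong\nColoration"),
  ("species_fidelity", "impossible_geometry", "Impossible\nGeometry"),
  ("image_quality", "blurry_artifacts", "Blurry/\nArtifacts"),
  ("image_quality", "background_bleed", "Background\nBleed"),
  ("image_quality", "flower_unrealistic", "Unrealistic\nFlowers"),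
  ("image_quality", "repetitive_pattern", "Repetitive\nPattern")]

-- truthiness of r.get(section, {}).get(field): None and 0 are falsy
def pvFlag (r : List (String × List (String × Int))) (sec fld : String) : Bool :=
  match (PySem.Dict.mk r).get? sec with
  | none => false
  | some sub =>
    match (PySem.Dict.mk sub).get? fld with
    | none => false
    | some v => v != 0

def aggregate_failure_counts_py (valid : List (List (String × List (String × Int)))) : List (String × Int) :=
  -- counts = {f[2]: 0 for f in _FAILURE_FIELDS}; for r in valid: … counts[label] += 1  (computed, then discarded by A)
  let counts : PySem.Dict String Int :=
    pvFFL.foldl (fun d f => d.insert f.2.2 0) PySem.Dict.empty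
  let _counts : PySem.Dict String Int :=
    valid.foldl (fun c r =>
      pvFFL.foldl (fun c f =>
        if pvFlag r f.1 f.2.1 then c.insert f.2.2 (c.getD f.2.2 0 + 1) else c) c) counts
  -- return {field: sum(1 for r in valid if r.get(section, {}).get(field)) for section, field, _ in _FAILURE_FIELDS}
  (pvFFL.foldl (fun d f =>
      d.insert f.2.1 (valid.foldl (fun acc r => if pvFlag r f.1 f.2.1 then acc + 1 else acc) 0))
    PySem.Dict.empty).items

-- ===== PORT B =====
def aggregate_failure_counts_py_alt (valid : List (List (String × List (String × Int)))) : List (String × Int) :=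
  -- counts = [0] * len(_FAILURE_FIELDS)
  let counts0 : List Int := List.replicate pvFFL.length 0
  -- for r in valid: counts = [c + (1 if … else 0) for c, (section, field, _) in zip(counts, _FAILURE_FIELDS)]
  let counts : List Int :=
    valid.foldl (fun cs r =>
      (cs.zip pvFFL).map (fun p => p.1 + (if pvFlag r p.2.1 p.2.2.1 then 1 else 0))) counts0
  -- return {field: c for (_, field, _), c in zip(_FAILURE_FIELDS, counts)}
  ((PySem.Dict.empty : PySem.Dict String Int).update
    ((pvFFL.zip counts).map (fun p => (p.1.2.1, p.2)))).items

-- ===== PRECONDITION & SPEC =====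
def Spec_aggregate_failure_counts_py (valid : List (List (String × List (String × Int)))) (out : List (String × Int)) : Prop := out = aggregate_failure_counts_py_alt valid
instance (valid : List (List (String × List (String × Int)))) (out : List (String × Int)) : Decidable (Spec_aggregate_failure_counts_py valid out) := by unfold Spec_aggregate_failure_counts_py; infer_instance

-- ===== CLAIM (what is proved, stated in full; the proofs are below) =====
def Claim_equal_aggregate_failure_counts_py : Prop := ∀ (valid : List (List (String × List (String × Int)))), Dom_aggregate_failure_counts_py valid → Spec_aggregate_failure_counts_py valid (aggregate_failure_counts_py valid)

-- ===== LEMMAS AND PROOFS =====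

-- the single-pass loop of B keeps, in each slot, the initial counter plus the number of flagged records seen
lemma b_step (r : List (String × List (String × Int))) (c1 c2 c3 c4 c5 c6 c7 : Int) :
    (([c1, c2, c3, c4, c5, c6, c7].zip pvFFL).map
      (fun p => p.1 + (if pvFlag r p.2.1 p.2.2.1 then 1 else 0))) =
    [c1 + (if pvFlag r "species_fidelity" "extra_missing_limbs" then 1 else 0),
     c2 + (if pvFlag r "species_fidelity" "wrong_coloration" then 1 else 0),
     c3 + (if pvFlag r "species_fidelity" "impossible_geometry" then 1 else 0),
     c4 + (if pvFlag r "image_quality" "blurry_artifacts" then 1 else 0),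
     c5 + (if pvFlag r "image_quality" "background_bleed" then 1 else 0),
     c6 + (if pvFlag r "image_quality" "flower_unrealistic" then 1 else 0),
     c7 + (if pvFlag r "image_quality" "repetitive_pattern" then 1 else 0)] := by
  simp [pvFFL]

lemma b_loop_inv (valid : List (List (String × List (String × Int))))
    (c1 c2 c3 c4 c5 c6 c7 : Int) :
    valid.foldl (fun cs r =>
      (cs.zip pvFFL).map (fun p => p.1 + (if pvFlag r p.2.1 p.2.2.1 then 1 else 0)))
      [c1, c2, c3, c4, c5, c6, c7] =
    [c1 + (valid.countP (fun r => pvFlag r "species_fidelity" "extra_missing_limbs") : Int),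
     c2 + (valid.countP (fun r => pvFlag r "species_fidelity" "wrong_coloration") : Int),
     c3 + (valid.countP (fun r => pvFlag r "species_fidelity" "impossible_geometry") : Int),
     c4 + (valid.countP (fun r => pvFlag r "image_quality" "blurry_artifacts") : Int),
     c5 + (valid.countP (fun r => pvFlag r "image_quality" "background_bleed") : Int),
     c6 + (valid.countP (fun r => pvFlag r "image_quality" "flower_unrealistic") : Int),
     c7 + (valid.countP (fun r => pvFlag r "image_quality" "repetitive_pattern") : Int)] := by
  induction valid generalizing c1 c2 c3 c4 c5 c6 c7 with
  | nil => simp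
  | cons r rest ih =>
    rw [List.foldl_cons, b_step, ih]
    simp only [List.countP_cons]
    simp only [List.cons.injEq, and_true]
    refine ⟨?_, ?_, ?_, ?_, ?_, ?_, ?_⟩ <;> (split_ifs <;> push_cast <;> ring)

-- each of A's seven sum(...) scans counts the flagged records
lemma a_sum_count (valid : List (List (String × List (String × Int)))) (sec fld : String) :
    valid.foldl (fun acc r => if pvFlag r sec fld then acc + 1 else acc) 0 =
    (valid.countP (fun r => pvFlag r sec fld) : Int) := by
  rw [PySem.List.foldl_count_if]
  simp

-- ===== VERDICT (by name: the statement is the Claim_ definition above) =====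
theorem aggregate_failure_counts_py_spec : Claim_equal_aggregate_failure_counts_py := by
  intro valid _
  show aggregate_failure_counts_py valid = aggregate_failure_counts_py_alt valid
  unfold aggregate_failure_counts_py aggregate_failure_counts_py_alt
  have h0 : List.replicate pvFFL.length (0 : Int) = [0, 0, 0, 0, 0, 0, 0] := rfl
  rw [h0]
  dsimp only
  rw [b_loop_inv]
  simp only [pvFFL, List.foldl_cons, List.foldl_nil, List.zip, List.zipWith, List.map]
  simp [PySem.Dict.insert, PySem.Dict.update, PySem.Dict.empty,
        PySem.Dict.contains, a_sum_count]
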